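-- pv_equiv track=rewrite | github.com/kkr010128/codebert | problem113/problem113_105.py | score_by_simple_method
-- ===== SOURCE A (Python) =====
-- def score_by_simple_method(schedule, loss_list, satisfied_matrix):
--     prev_list = [-1] * 26
--     plus = 0
--     minus = 0
--     for day, open_contest in enumerate(schedule):
--         prev_list[open_contest] = day
--         plus += satisfied_matrix[day][open_contest]
--
--         for contest, prev_day in enumerate(prev_list):
--             spend = day - prev_day
--             loss_base = loss_list[contest]
--             minus += loss_base * spend
--
--     return plus - minus
-- ===== SOURCE B (Python) =====
-- def score_by_simple_method(schedule, loss_list, satisfied_matrix):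
--     # Closed-form gap accounting: each contest's contribution to the loss is a
--     # triangular number per gap between consecutive openings, so we sum
--     # g*(g+1)//2 per gap instead of rescanning all 26 contests every day.
--     n = len(schedule)
--     plus = sum(satisfied_matrix[d][c] for d, c in enumerate(schedule))
--     last = [-1] * 26
--     minus = 0
--     for d, c in enumerate(schedule):
--         g = d - last[c] - 1
--         minus += loss_list[c] * (g * (g + 1) // 2)
--         last[c] = d
--     for p, lb in zip(last, loss_list):
--         g = n - 1 - p
--         minus += lb * (g * (g + 1) // 2)
--     return plus - minus
-- ===== Notes on version B (the rewrite author's own statement) =====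
-- stated objective: faster
-- what changed: Replaces A's per-day rescan of all 26 contests with closed-form gap accounting: each contest contributes a triangular number g*(g+1)//2 per gap between consecutive openings, summed in one linear pass plus a final 26-entry pass.
import Mathlib
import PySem

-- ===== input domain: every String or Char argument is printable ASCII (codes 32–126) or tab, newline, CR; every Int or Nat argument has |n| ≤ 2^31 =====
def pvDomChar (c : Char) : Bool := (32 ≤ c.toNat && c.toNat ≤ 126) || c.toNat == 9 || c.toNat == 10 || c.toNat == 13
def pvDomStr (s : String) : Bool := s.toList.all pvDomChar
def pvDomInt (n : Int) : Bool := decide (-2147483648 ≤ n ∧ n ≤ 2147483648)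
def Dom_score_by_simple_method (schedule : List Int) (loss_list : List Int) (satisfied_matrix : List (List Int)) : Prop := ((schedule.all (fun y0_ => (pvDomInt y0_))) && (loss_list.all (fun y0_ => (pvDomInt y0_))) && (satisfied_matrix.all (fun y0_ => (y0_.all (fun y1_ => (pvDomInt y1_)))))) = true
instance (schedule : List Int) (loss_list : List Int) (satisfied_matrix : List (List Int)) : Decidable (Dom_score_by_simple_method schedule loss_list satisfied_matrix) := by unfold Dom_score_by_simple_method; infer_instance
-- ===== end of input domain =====

-- B replaces A's per-day rescan of all 26 contests by closed-form gap accounting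
-- (one triangular number g*(g+1)//2 per gap between consecutive openings): smaller constant factor.


-- ===== PORT A =====
-- one iteration of A's outer loop: set prev, add satisfaction, rescan all 26 prev entries
def stepA (loss_list : List Int) (satisfied_matrix : List (List Int))
    (st : List Int × Int × Int) (dc : Int × Int) : List Int × Int × Int :=
  let day := dc.1
  let open_contest := dc.2
  let prev_list := PySem.List.pySetD st.1 open_contest day
  let plus := st.2.1 + PySem.List.pyGetD (PySem.List.pyGetD satisfied_matrix day []) open_contest 0
  let minus := (PySem.List.enumerate prev_list 0).foldl
      (fun m cp => m + PySem.List.pyGetD loss_list cp.1 0 * (day - cp.2)) st.2.2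
  (prev_list, plus, minus)

def score_by_simple_method (schedule : List Int) (loss_list : List Int) (satisfied_matrix : List (List Int)) : Int :=
  let r := (PySem.List.enumerate schedule 0).foldl (stepA loss_list satisfied_matrix)
      (List.replicate 26 (-1), 0, 0)
  r.2.1 - r.2.2

-- ===== PORT B =====
-- B's main loop: for each opening, add loss[c] * tri(gap) for the gap just closed; state (last, minus)
def stepB (loss_list : List Int) (st : List Int × Int) (dc : Int × Int) : List Int × Int :=
  let d := dc.1
  let c := dc.2
  let g := d - PySem.List.pyGetD st.1 c 0 - 1
  let minus := st.2 + PySem.List.pyGetD loss_list c 0 * PySem.Int.floordiv (g * (g + 1)) 2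
  (PySem.List.pySetD st.1 c d, minus)

def score_by_simple_method_alt (schedule : List Int) (loss_list : List Int) (satisfied_matrix : List (List Int)) : Int :=
  let n : Int := schedule.length
  let plus := ((PySem.List.enumerate schedule 0).map
      (fun dc => PySem.List.pyGetD (PySem.List.pyGetD satisfied_matrix dc.1 []) dc.2 0)).sum
  let r := (PySem.List.enumerate schedule 0).foldl (stepB loss_list) (List.replicate 26 (-1), 0)
  let minus := (r.1.zip loss_list).foldl
      (fun m pl =>
        let g := n - 1 - pl.1
        m + pl.2 * PySem.Int.floordiv (g * (g + 1)) 2) r.2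
  plus - minus

-- ===== PRECONDITION & SPEC =====
-- Pre_ is the natural domain of the task (contest ids 0..25, at least the 26 loss values,
-- a satisfaction entry for every scheduled day); it excludes inputs with negative contest ids,
-- on which A still returns a value via Python's negative-index wraparound, and inputs where
-- A raises (loss_list shorter than 26, missing satisfaction row/entry).
def Pre_score_by_simple_method (schedule : List Int) (loss_list : List Int) (satisfied_matrix : List (List Int)) : Prop :=
  (schedule = [] ∨ 26 ≤ loss_list.length) ∧ schedule.length ≤ satisfied_matrix.length ∧
  ∀ i < schedule.length, 0 ≤ schedule.getD i 0 ∧ schedule.getD i 0 < 26 ∧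
    schedule.getD i 0 < ((satisfied_matrix.getD i []).length : Int)
instance (schedule : List Int) (loss_list : List Int) (satisfied_matrix : List (List Int)) : Decidable (Pre_score_by_simple_method schedule loss_list satisfied_matrix) := by unfold Pre_score_by_simple_method; infer_instance

def pvWitness_score_by_simple_method : List Int × List Int × List (List Int) :=
  ([0, 3, 0], [1, 2, 0, 0, 1, 0, 0, 0, 0, 0, 0, 0, 0, 0, 0, 0, 0, 0, 0, 0, 0, 0, 0, 0, 0, 3],
   [[5, 0, 0, 1], [2, 0, 0, 7], [1, 0, 0, 0]])

def Spec_score_by_simple_method (schedule : List Int) (loss_list : List Int) (satisfied_matrix : List (List Int)) (out : Int) : Prop := out = score_by_simple_method_alt schedule loss_list satisfied_matrix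
instance (schedule : List Int) (loss_list : List Int) (satisfied_matrix : List (List Int)) (out : Int) : Decidable (Spec_score_by_simple_method schedule loss_list satisfied_matrix out) := by unfold Spec_score_by_simple_method; infer_instance

-- ===== CLAIM (what is proved, stated in full; the proofs are below) =====
def Claim_equal_score_by_simple_method : Prop := ∀ (schedule : List Int) (loss_list : List Int) (satisfied_matrix : List (List Int)), Dom_score_by_simple_method schedule loss_list satisfied_matrix → Pre_score_by_simple_method schedule loss_list satisfied_matrix → Spec_score_by_simple_method schedule loss_list satisfied_matrix (score_by_simple_method schedule loss_list satisfied_matrix)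

-- ===== LEMMAS AND PROOFS =====

-- triangular numbers, proof-side recursive form
def triN : Nat → Int
  | 0 => 0
  | g + 1 => triN g + (g + 1)

lemma triN_eq_div : ∀ g : Nat, triN g = ((g * (g + 1) / 2 : Nat) : Int) := by
  intro g
  induction g with
  | zero => simp [triN]
  | succ g ih =>
    have e : (g + 1) * (g + 1 + 1) = g * (g + 1) + 2 * (g + 1) := by ring
    have h : (g + 1) * (g + 1 + 1) / 2 = g * (g + 1) / 2 + (g + 1) := by omega
    rw [triN, ih, h]
    push_cast
    ring

lemma fd_tri (g : Int) (h : 0 ≤ g) : PySem.Int.floordiv (g * (g + 1)) 2 = triN g.toNat := by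
  obtain ⟨n, rfl⟩ := Int.eq_ofNat_of_zero_le h
  have h1 : ((n : Int)) * ((n : Int) + 1) = ((n * (n + 1) : Nat) : Int) := by push_cast; ring
  rw [h1, show (2 : Int) = ((2 : Nat) : Int) from rfl, PySem.Int.floordiv_natCast,
      triN_eq_div, Int.toNat_natCast]

lemma triN_succ_int (k : Int) (h : 0 ≤ k) : triN (k + 1).toNat = triN k.toNat + (k + 1) := by
  have h1 : (k + 1).toNat = k.toNat + 1 := by omega
  rw [h1, triN]
  congr 1
  omega

-- Σ_{i} loss[s+i] * (day - prev[i]) : the value A's inner rescan adds to minus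
def penSum (loss : List Int) (prev : List Int) (day : Int) (s : Nat) : Int :=
  match prev with
  | [] => 0
  | p :: rest => loss.getD s 0 * (day - p) + penSum loss rest day (s + 1)

-- Σ_{i} loss[s+i] * triN(t-1-prev[i]) : pending (not yet closed) gap contributions
def triSum (loss : List Int) (prev : List Int) (t : Int) (s : Nat) : Int :=
  match prev with
  | [] => 0
  | p :: rest => loss.getD s 0 * triN (t - 1 - p).toNat + triSum loss rest t (s + 1)

lemma innerA (loss : List Int) (day : Int) (prev : List Int) :
    ∀ (s : Nat) (m : Int),
    (PySem.List.enumerate prev (s : Int)).foldl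
      (fun m cp => m + PySem.List.pyGetD loss cp.1 0 * (day - cp.2)) m
    = m + penSum loss prev day s := by
  induction prev with
  | nil => intro s m; simp [PySem.List.enumerate_nil, penSum]
  | cons p rest ih =>
    intro s m
    rw [PySem.List.enumerate_cons]
    have h1 : ((s : Int) + 1) = ((s + 1 : Nat) : Int) := by push_cast; ring
    simp only [List.foldl_cons, h1, ih]
    simp [penSum, PySem.List.pyGetD_natCast]
    ring

-- Σ over (prev_i, loss_i) pairs of loss_i * triN(n-1-prev_i)
def triZ (pairs : List (Int × Int)) (n : Int) : Int :=
  match pairs with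
  | [] => 0
  | pl :: rest => pl.2 * triN (n - 1 - pl.1).toNat + triZ rest n

lemma zipfold (n : Int) : ∀ (pairs : List (Int × Int)) (m : Int),
    (∀ pl ∈ pairs, pl.1 ≤ n - 1) →
    pairs.foldl
      (fun m pl =>
        m + pl.2 * PySem.Int.floordiv ((n - 1 - pl.1) * ((n - 1 - pl.1) + 1)) 2) m
    = m + triZ pairs n := by
  intro pairs
  induction pairs with
  | nil => intro m _; simp [triZ]
  | cons pl rest ih =>
    intro m hb
    have hg : (0 : Int) ≤ n - 1 - pl.1 := by
      have := hb pl List.mem_cons_self; omega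
    simp only [List.foldl_cons]
    rw [ih _ (fun q hq => hb q (List.mem_cons_of_mem _ hq)), fd_tri _ hg, triZ]
    ring

lemma triZ_eq (loss : List Int) (n : Int) : ∀ (prev : List Int) (s : Nat),
    prev.length + s ≤ loss.length →
    triZ (prev.zip (loss.drop s)) n = triSum loss prev n s := by
  intro prev
  induction prev with
  | nil => intro s _; simp [triZ, triSum]
  | cons p rest ih =>
    intro s hlen
    have hs : s < loss.length := by simp at hlen; omega
    rw [List.drop_eq_getElem_cons hs, List.zip_cons_cons]
    simp only [triZ, triSum]
    rw [ih (s + 1) (by simp at hlen ⊢; omega), List.getD_eq_getElem loss 0 hs]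

lemma triZ_zero (n : Int) : ∀ (pairs : List (Int × Int)),
    (∀ pl ∈ pairs, (n - 1 - pl.1).toNat = 0) → triZ pairs n = 0 := by
  intro pairs
  induction pairs with
  | nil => intro _; rfl
  | cons pl rest ih =>
    intro hb
    rw [triZ, hb pl List.mem_cons_self, ih (fun q hq => hb q (List.mem_cons_of_mem _ hq))]
    simp [triN]

lemma penSum_shift (loss : List Int) (d : Int) (prev : List Int) :
    ∀ s : Nat, (∀ p ∈ prev, p ≤ d) →
    penSum loss prev d s + triSum loss prev d s = triSum loss prev (d + 1) s := by
  induction prev with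
  | nil => intro s _; simp [penSum, triSum]
  | cons p rest ih =>
    intro s hb
    have hp : p ≤ d := hb p List.mem_cons_self
    have hrest := ih (s + 1) (fun q hq => hb q (List.mem_cons_of_mem _ hq))
    simp only [penSum, triSum]
    rw [← hrest]
    have hhead : loss.getD s 0 * (d - p) + loss.getD s 0 * triN (d - 1 - p).toNat
        = loss.getD s 0 * triN (d + 1 - 1 - p).toNat := by
      rcases eq_or_lt_of_le hp with h | h
      · have h1 : (d - 1 - p).toNat = 0 := by omega
        have h2 : (d + 1 - 1 - p).toNat = 0 := by omega
        have h3 : d - p = 0 := by omega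
        rw [h1, h2, h3]; ring
      · have hk : (0 : Int) ≤ d - 1 - p := by omega
        have h2 : d + 1 - 1 - p = (d - 1 - p) + 1 := by ring
        rw [h2, triN_succ_int _ hk]
        ring
    rw [← hhead]
    ring

lemma triSum_set (loss : List Int) (t v : Int) (prev : List Int) :
    ∀ (j : Nat) (s : Nat), j < prev.length →
    triSum loss (prev.set j v) t s
      = triSum loss prev t s
        + loss.getD (s + j) 0 * (triN (t - 1 - v).toNat - triN (t - 1 - prev.getD j 0).toNat) := by
  induction prev with
  | nil => intro j s h; simp at h
  | cons p rest ih =>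
    intro j s h
    cases j with
    | zero => simp [triSum]; ring
    | succ j =>
      simp only [List.set_cons_succ, triSum, List.getD_cons_succ]
      rw [ih j (s + 1) (by simpa using h)]
      have : s + 1 + j = s + (j + 1) := by omega
      rw [this]
      ring

lemma triSum_init (loss : List Int) : ∀ (n : Nat) (s : Nat),
    triSum loss (List.replicate n (-1)) 0 s = 0 := by
  intro n
  induction n with
  | zero => intro s; simp [triSum]
  | succ n ih => intro s; simp [List.replicate_succ, triSum, ih (s + 1), triN]

lemma loop_eq (loss : List Int) (sat : List (List Int)) :
    ∀ (sched : List Int), (∀ x ∈ sched, 0 ≤ x ∧ x < 26) →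
    ∀ (d : Int) (prev : List Int), prev.length = 26 → (∀ p ∈ prev, p < d) →
    ∀ (plus minusA minusB : Int), minusA = minusB + triSum loss prev d 0 →
    ((PySem.List.enumerate sched d).foldl (stepA loss sat) (prev, plus, minusA)).1
      = ((PySem.List.enumerate sched d).foldl (stepB loss) (prev, minusB)).1
    ∧ ((PySem.List.enumerate sched d).foldl (stepA loss sat) (prev, plus, minusA)).2.1
      = plus + ((PySem.List.enumerate sched d).map
          (fun dc => PySem.List.pyGetD (PySem.List.pyGetD sat dc.1 []) dc.2 0)).sum
    ∧ ((PySem.List.enumerate sched d).foldl (stepA loss sat) (prev, plus, minusA)).2.2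
      = ((PySem.List.enumerate sched d).foldl (stepB loss) (prev, minusB)).2
        + triSum loss ((PySem.List.enumerate sched d).foldl (stepB loss) (prev, minusB)).1
            (d + sched.length) 0
    ∧ (∀ p ∈ ((PySem.List.enumerate sched d).foldl (stepB loss) (prev, minusB)).1,
        p < d + sched.length)
    ∧ ((PySem.List.enumerate sched d).foldl (stepB loss) (prev, minusB)).1.length = 26 := by
  intro sched
  induction sched with
  | nil =>
    intro _ d prev hlen hb plus minusA minusB hinv
    refine ⟨rfl, ?_, ?_, ?_, ?_⟩
    · simp [PySem.List.enumerate_nil]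
    · simp only [PySem.List.enumerate_nil, List.foldl_nil, List.length_nil,
        Nat.cast_zero, add_zero]
      exact hinv
    · simp only [PySem.List.enumerate_nil, List.foldl_nil, List.length_nil,
        Nat.cast_zero, add_zero]
      exact hb
    · simp only [PySem.List.enumerate_nil, List.foldl_nil]
      assumption
  | cons oc rest ih =>
    intro hoc d prev hlen hb plus minusA minusB hinv
    obtain ⟨hoc0, hoc26⟩ := hoc oc List.mem_cons_self
    have hrest : ∀ x ∈ rest, 0 ≤ x ∧ x < 26 := fun x hx => hoc x (List.mem_cons_of_mem _ hx)
    rw [PySem.List.enumerate_cons]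
    set j := oc.toNat with hj
    have hocj : oc = (j : Int) := (Int.toNat_of_nonneg hoc0).symm
    have hjlt : j < prev.length := by rw [hlen]; omega
    set p := prev.getD j 0 with hp
    have hpmem : p ∈ prev := by
      rw [hp, List.getD_eq_getElem prev 0 hjlt]; exact List.getElem_mem hjlt
    have hpd : p < d := hb p hpmem
    have hset : PySem.List.pySetD prev oc d = prev.set j d := by
      rw [hocj, PySem.List.pySetD_natCast]
    have hgetp : PySem.List.pyGetD prev oc 0 = p := by
      rw [hocj, PySem.List.pyGetD_natCast]
    have hgetl : PySem.List.pyGetD loss oc 0 = loss.getD j 0 := by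
      rw [hocj, PySem.List.pyGetD_natCast]
    set prev' := prev.set j d with hprev'
    have hb' : ∀ q ∈ prev', q < d + 1 := by
      intro q hq
      rcases List.mem_or_eq_of_mem_set hq with h | h
      · have := hb q h; omega
      · omega
    -- new invariant value of minus
    have hA : minusA + penSum loss prev' d 0
        = (minusB + loss.getD j 0 * triN (d - 1 - p).toNat) + triSum loss prev' (d + 1) 0 := by
      have hshift := penSum_shift loss d prev' 0 (fun q hq => by have := hb' q hq; omega)
      have hset6 := triSum_set loss d d prev j 0 hjlt
      simp only [zero_add, ← hp] at hset6
      have hz : triN (d - 1 - d).toNat = 0 := by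
        have : (d - 1 - d).toNat = 0 := by omega
        rw [this]; rfl
      rw [hinv, ← hshift, ← hprev'] at *
      rw [hset6, hz]
      ring
    -- B's step value matches
    have hBstep : stepB loss (prev, minusB) (d, oc)
        = (prev', minusB + loss.getD j 0 * triN (d - 1 - p).toNat) := by
      simp only [stepB, hgetp, hgetl, hset]
      have hg0 : (0 : Int) ≤ d - p - 1 := by omega
      have hgg : d - p - 1 = d - 1 - p := by ring
      rw [fd_tri _ hg0, hgg]
    have hAstep : stepA loss sat (prev, plus, minusA) (d, oc)
        = (prev', plus + PySem.List.pyGetD (PySem.List.pyGetD sat d []) oc 0,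
           minusA + penSum loss prev' d 0) := by
      have hin := innerA loss d prev' 0 minusA
      simp only [Nat.cast_zero] at hin
      simp only [stepA, hset, hin]
    simp only [List.foldl_cons, hAstep, hBstep, List.map_cons, List.sum_cons]
    have := ih hrest (d + 1) prev' (by simp [hprev', hlen])
      hb' (plus + PySem.List.pyGetD (PySem.List.pyGetD sat d []) oc 0)
      (minusA + penSum loss prev' d 0)
      (minusB + loss.getD j 0 * triN (d - 1 - p).toNat) hA
    simp only [List.length_cons, Nat.cast_add, Nat.cast_one]
    refine ⟨this.1, by rw [this.2.1]; ring, ?_, ?_, this.2.2.2.2⟩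
    · rw [this.2.2.1]
      congr 2
      ring
    · intro q hq
      have h5 := this.2.2.2.1 q hq
      omega

-- ===== VERDICT (by name: the statement is the Claim_ definition above) =====
theorem score_by_simple_method_spec : Claim_equal_score_by_simple_method := by
  intro schedule loss sat _ hpre
  unfold Spec_score_by_simple_method
  simp only [score_by_simple_method, score_by_simple_method_alt]
  rcases schedule with _ | ⟨x, xs⟩
  · -- empty schedule: both sides are 0 - 0
    simp only [PySem.List.enumerate_nil, List.foldl_nil, List.map_nil, List.sum_nil,
      List.length_nil, Nat.cast_zero]
    rw [zipfold 0 ((List.replicate 26 (-1 : Int)).zip loss) 0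
        (fun pl hpl => by
          have := List.eq_of_mem_replicate ((List.of_mem_zip hpl).1); omega),
      triZ_zero 0 _
        (fun pl hpl => by
          have := List.eq_of_mem_replicate ((List.of_mem_zip hpl).1); omega)]
    norm_num
  · set schedule := x :: xs with hsched
    have hne : schedule ≠ [] := by simp [hsched]
    have hloss : 26 ≤ loss.length := by
      rcases hpre.1 with h | h
      · exact absurd h hne
      · exact h
    have hoc : ∀ y ∈ schedule, 0 ≤ y ∧ y < 26 := by
      intro y hy
      obtain ⟨i, hi, rfl⟩ := List.mem_iff_getElem.mp hy
      have := hpre.2.2 i hi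
      rw [List.getD_eq_getElem?_getD, List.getElem?_eq_getElem hi] at this
      simp only [Option.getD_some] at this
      exact ⟨this.1, this.2.1⟩
    have hinit : (0 : Int) = 0 + triSum loss (List.replicate 26 (-1)) 0 0 := by
      rw [triSum_init loss 26 0]; norm_num
    have hrep : ∀ p ∈ List.replicate 26 (-1 : Int), p < 0 := by
      intro p hp
      rw [List.eq_of_mem_replicate hp]; norm_num
    have h := loop_eq loss sat schedule hoc 0 (List.replicate 26 (-1)) (by simp) hrep 0 0 0 hinit
    simp only [zero_add] at h
    rw [h.2.1, h.2.2.1]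
    rw [zipfold (schedule.length : Int) _ _
      (fun pl hpl => by
        have := h.2.2.2.1 pl.1 ((List.of_mem_zip hpl).1); omega)]
    have ht := triZ_eq loss (schedule.length : Int)
      ((PySem.List.enumerate schedule 0).foldl (stepB loss) (List.replicate 26 (-1), 0)).1 0
      (by rw [h.2.2.2.2]; omega)
    rw [List.drop_zero] at ht
    rw [ht]
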